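-- pv_equiv track=rewrite | github.com/yuvaldadon/BacktrackingSudoku | solver.py | no_duplicates
-- ===== SOURCE A (Python) =====
-- def no_duplicates(list):
--      temp=[]
--      for i in list:
--           if i!=0:
--                if i in temp:
--                     return False
--                else:
--                     temp.append(i)
--      return True
-- ===== SOURCE B (Python) =====
-- def no_duplicates(list):
--     vals = [i for i in list if i != 0]
--     return len(vals) == len(set(vals))
-- ===== Notes on version B (the rewrite author's own statement) =====
-- stated objective: simpler
-- what changed: Replaces the early-exit scan that maintains a seen-list with membership tests by a one-pass filter of the nonzero entries followed by a cardinality comparison between the list and its set.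
import Mathlib
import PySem

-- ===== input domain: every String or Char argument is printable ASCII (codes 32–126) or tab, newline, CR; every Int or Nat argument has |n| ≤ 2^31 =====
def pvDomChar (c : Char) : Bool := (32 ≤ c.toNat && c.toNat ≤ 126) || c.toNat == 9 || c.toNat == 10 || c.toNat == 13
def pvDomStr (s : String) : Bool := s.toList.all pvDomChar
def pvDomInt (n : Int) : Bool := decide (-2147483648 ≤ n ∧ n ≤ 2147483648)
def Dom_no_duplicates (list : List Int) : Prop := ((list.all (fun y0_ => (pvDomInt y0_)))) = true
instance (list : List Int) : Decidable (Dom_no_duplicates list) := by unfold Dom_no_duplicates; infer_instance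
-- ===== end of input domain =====

-- B drops A's running seen-list and early exit: it filters the nonzero entries once and
-- compares the list's length with its set's size (objective: simpler).

-- ===== PORT A =====
-- the loop of A: temp is the accumulator list, early return False on a repeat
def noDupGo : List Int → List Int → Bool
  | [], _ => true
  | i :: rest, temp =>
    if i ≠ 0 then
      if i ∈ temp then false
      else noDupGo rest (temp ++ [i])
    else noDupGo rest temp

def no_duplicates (list : List Int) : Bool := noDupGo list []

-- ===== PORT B =====
def no_duplicates_alt (list : List Int) : Bool :=
  let vals := list.filter (fun i => i != 0)
  vals.length == (PySem.Set.ofList vals).length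

-- ===== PRECONDITION & SPEC =====
def Spec_no_duplicates (list : List Int) (out : Bool) : Prop := out = no_duplicates_alt list
instance (list : List Int) (out : Bool) : Decidable (Spec_no_duplicates list out) := by unfold Spec_no_duplicates; infer_instance

-- ===== CLAIM (what is proved, stated in full; the proofs are below) =====
def Claim_equal_no_duplicates : Prop := ∀ (list : List Int), Dom_no_duplicates list → Spec_no_duplicates list (no_duplicates list)

-- ===== LEMMAS AND PROOFS =====

lemma noDupGo_eq (l temp : List Int) :
    noDupGo l temp
      = (decide (l.filter (fun i => i != 0)).Nodup &&
         (l.filter (fun i => i != 0)).all (fun x => !(decide (x ∈ temp)))) := by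
  induction l generalizing temp with
  | nil => simp [noDupGo]
  | cons i rest ih =>
    by_cases hz : i = 0
    · simpa [noDupGo, hz] using ih temp
    · by_cases hm : i ∈ temp
      · simp [noDupGo, hz, hm]
      · rw [show noDupGo (i :: rest) temp = noDupGo rest (temp ++ [i]) from by
            simp [noDupGo, hz, hm], ih]
        rw [show List.filter (fun i => i != 0) (i :: rest)
              = i :: List.filter (fun i => i != 0) rest from by simp [hz]]
        apply Bool.eq_iff_iff.mpr
        simp only [Bool.and_eq_true, decide_eq_true_eq, List.all_eq_true, Bool.not_eq_true',
          decide_eq_false_iff_not, List.nodup_cons, List.mem_append, List.mem_cons,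
          List.all_cons]
        constructor
        · rintro ⟨hnd, hdisj⟩
          refine ⟨⟨fun hif => ?_, hnd⟩, hm, fun x hx => ?_⟩
          · exact (hdisj i hif) (Or.inr (Or.inl rfl))
          · exact fun hxt => (hdisj x hx) (Or.inl hxt)
        · rintro ⟨⟨hif, hnd⟩, _, hdisj⟩
          refine ⟨hnd, fun x hx => ?_⟩
          rintro (hxt | hxi | hfalse)
          · exact (hdisj x hx) hxt
          · exact hif (hxi ▸ hx)
          · exact (List.not_mem_nil hfalse)

lemma foldl_add_len_le (xs s : List Int) :
    (xs.foldl PySem.Set.add s).length ≤ s.length + xs.length := by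
  induction xs generalizing s with
  | nil => simp
  | cons x xs ih =>
    have h := ih (PySem.Set.add s x)
    have hlen : (PySem.Set.add s x).length ≤ s.length + 1 := by
      unfold PySem.Set.add
      split <;> simp
    simp only [List.foldl_cons, List.length_cons]
    omega

lemma foldl_add_eq_append (xs s : List Int) (h1 : xs.Nodup) (h2 : ∀ x ∈ xs, x ∉ s) :
    xs.foldl PySem.Set.add s = s ++ xs := by
  induction xs generalizing s with
  | nil => simp
  | cons x xs ih =>
    have hx : x ∉ s := h2 x (by simp)
    have hadd : PySem.Set.add s x = s ++ [x] := by
      unfold PySem.Set.add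
      simp [PySem.Set.contains, hx]
    simp only [List.foldl_cons, hadd]
    rw [ih (s ++ [x]) h1.of_cons]
    · simp
    · intro y hy
      simp only [List.mem_append, List.mem_singleton]
      rintro (h | rfl)
      · exact h2 y (by simp [hy]) h
      · exact (List.nodup_cons.mp h1).1 hy

lemma foldl_add_len_lt (xs s : List Int) (h : ¬ (xs.Nodup ∧ ∀ x ∈ xs, x ∉ s)) :
    (xs.foldl PySem.Set.add s).length < s.length + xs.length := by
  induction xs generalizing s with
  | nil => simp [List.nodup_nil] at h
  | cons x xs ih =>
    by_cases hx : x ∈ s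
    · have hadd : PySem.Set.add s x = s := by
        unfold PySem.Set.add
        simp [PySem.Set.contains, hx]
      have := foldl_add_len_le xs s
      simp only [List.foldl_cons, hadd, List.length_cons]
      omega
    · have hadd : PySem.Set.add s x = s ++ [x] := by
        unfold PySem.Set.add
        simp [PySem.Set.contains, hx]
      have h' : ¬ (xs.Nodup ∧ ∀ y ∈ xs, y ∉ s ++ [x]) := by
        intro hc
        obtain ⟨hnd, hdisj⟩ := hc
        apply h
        refine ⟨List.nodup_cons.mpr ⟨fun hm => (hdisj x hm) (by simp), hnd⟩, ?_⟩
        intro y hy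
        rcases List.mem_cons.mp hy with rfl | hy'
        · exact hx
        · exact fun hys => (hdisj y hy') (by simp [hys])
      have := ih (s ++ [x]) h'
      simp only [List.foldl_cons, hadd, List.length_cons]
      simp only [List.length_append, List.length_cons, List.length_nil] at this
      omega

lemma alt_eq (l : List Int) :
    no_duplicates_alt l = decide (l.filter (fun i => i != 0)).Nodup := by
  unfold no_duplicates_alt
  show ((l.filter (fun i => i != 0)).length
        == (PySem.Set.ofList (l.filter (fun i => i != 0))).length)
      = decide (l.filter (fun i => i != 0)).Nodup
  have hof : PySem.Set.ofList (l.filter (fun i => i != 0))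
      = (l.filter (fun i => i != 0)).foldl PySem.Set.add [] := rfl
  by_cases hnd : (l.filter (fun i => i != 0)).Nodup
  · rw [hof, foldl_add_eq_append _ [] hnd (by simp)]
    simp [hnd]
  · have hlt := foldl_add_len_lt (l.filter (fun i => i != 0)) [] (by simp [hnd])
    simp only [List.length_nil, Nat.zero_add] at hlt
    simp only [hof, hnd, decide_false, beq_eq_false_iff_ne, ne_eq]
    omega

-- ===== VERDICT (by name: the statement is the Claim_ definition above) =====
theorem no_duplicates_spec : Claim_equal_no_duplicates := by
  intro l _
  unfold Spec_no_duplicates no_duplicates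
  rw [noDupGo_eq, alt_eq]
  simp
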